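-- pv_equiv track=rewrite | github.com/vexown/wave_rover_LoRa | Tools/lora_deinterleave.py | deinterleave_block
-- ===== SOURCE A (Python) =====
-- from typing import List
--
-- def symbol_to_bits(val: int, sf: int) -> List[int]:
--     """
--     Convert a symbol integer to an SF-length bit list, LSB first.
--
--     Why LSB first?
--     In LoRa's physical layer, the interleaver matrix is built starting from
--     the Least Significant Bit (LSB). Bit 0 of the symbol corresponds to Row 0
--     of the interleaving matrix.
--
--     Example (SF=8, val=0b10110001 or 177):
--         → [1, 0, 0, 0, 1, 1, 0, 1]
--            ^LSB                 ^MSB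
--     """
--     return [(val >> i) & 1 for i in range(sf)]
--
-- def deinterleave_block(symbol_block: List[int],
--                        sf_rows: int,
--                        sf: int,
--                        cr_plus4: int) -> List[List[int]]:
--     """
--     Deinterleave one block of symbols into a list of codewords.
--
--     Parameters
--     ----------
--     symbol_block : list of `cr_plus4` symbol integers (each 0 to 2^SF - 1)
--     sf_rows      : effective number of bit-rows to use per symbol
--                    • SF     for normal payload
--                    • SF - 2 for header (reduced-rate mode ignores the top 2 bits)
--     sf           : spreading factor (needed to know the total bits per symbol)
--     cr_plus4     : number of symbols per block = 4 + CR
--                    (this also dictates the length of the resulting codewords)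
--
--     Returns
--     -------
--     List of `sf_rows` codewords. Each codeword is a list of `cr_plus4` bits (LSB first).
--     """
--     C = cr_plus4   # columns = symbols per block
--     R = sf_rows    # rows    = codewords produced
--
--     # ── 1. Build the received interleaved bit-matrix I[row][col] ──────────
--     # We take our block of symbols and break them down into bits.
--     #    Row i  = bit position i  (0 = LSB)
--     #    Col j  = symbol index j  (0 to C-1)
--     #
--     # Note on Header: For header reduced-rate (R = SF-2), we only loop up to R.
--     # This automatically discards the top 2 bits of the symbol, which were
--     # forced to zero by the TX anyway.
--     I = [[0] * C for _ in range(R)]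
--     for j, sym in enumerate(symbol_block):
--         bits = symbol_to_bits(sym, sf)        # Expand integer to LSB-first bits
--         for i in range(R):
--             I[i][j] = bits[i]
--
--     # ── 2. Reverse the diagonal permutation ───────────────────────────────
--     # Here we trace the diagonals to reconstruct the codewords.
--     #  j = bit position in the codeword (0 to C-1)
--     #  k = codeword index (0 to R-1)
--     #
--     # The formula `(k - j) mod R` mathematically handles the "wrap-around"
--     # when a diagonal line hits the bottom of the matrix and continues
--     # from the top.
--     #
--     #  Derivation from gr-lora's rotl-then-extract-columns approach:
--     #    deinterleaved[x] bit i = rotl(symbol[i], i, R)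
--     #                     bit x = symbol[i] bit ((x - i) mod R)
--     D = [[0] * R for _ in range(C)]
--     for j in range(C):
--         for k in range(R):
--             i_idx = (k - j) % R
--             D[j][k] = I[i_idx][j]
--
--     # ── 3. Assemble codewords ─────────────────────────────────────────────
--     # Now we just read the reconstructed matrix D column-by-column to get
--     # our clean codewords.
--     # Bit index j corresponds to the j-th bit of the (4+CR)-bit codeword.
--     codewords = []
--     for k in range(R):
--         cw_bits = [D[j][k] for j in range(C)]
--         codewords.append(cw_bits)
--
--     return codewords
-- ===== SOURCE B (Python) =====
-- from typing import List
--
-- def deinterleave_block(symbol_block: List[int],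
--                        sf_rows: int,
--                        sf: int,
--                        cr_plus4: int) -> List[List[int]]:
--     # One fused pass: write each symbol's bits straight into their final
--     # codeword positions (codeword k, column j gets bit (k - j) mod R).
--     R = sf_rows
--     C = cr_plus4
--     codewords = [[0] * C for _ in range(R)]
--     for j, sym in enumerate(symbol_block):
--         bits = [(sym >> i) & 1 for i in range(sf)]
--         for k in range(R):
--             codewords[k][j] = bits[(k - j) % R]
--     return codewords
-- ===== Notes on version B (the rewrite author's own statement) =====
-- stated objective: alternative
-- what changed: B replaces A's three passes (build the bit matrix I, build the de-diagonalised matrix D, assemble codewords from D's columns) with a single fused pass that writes each symbol's bits directly into their final codeword positions via codewords[k][j] = bits[(k-j) % R], allocating no intermediate matrices.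
import Mathlib
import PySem

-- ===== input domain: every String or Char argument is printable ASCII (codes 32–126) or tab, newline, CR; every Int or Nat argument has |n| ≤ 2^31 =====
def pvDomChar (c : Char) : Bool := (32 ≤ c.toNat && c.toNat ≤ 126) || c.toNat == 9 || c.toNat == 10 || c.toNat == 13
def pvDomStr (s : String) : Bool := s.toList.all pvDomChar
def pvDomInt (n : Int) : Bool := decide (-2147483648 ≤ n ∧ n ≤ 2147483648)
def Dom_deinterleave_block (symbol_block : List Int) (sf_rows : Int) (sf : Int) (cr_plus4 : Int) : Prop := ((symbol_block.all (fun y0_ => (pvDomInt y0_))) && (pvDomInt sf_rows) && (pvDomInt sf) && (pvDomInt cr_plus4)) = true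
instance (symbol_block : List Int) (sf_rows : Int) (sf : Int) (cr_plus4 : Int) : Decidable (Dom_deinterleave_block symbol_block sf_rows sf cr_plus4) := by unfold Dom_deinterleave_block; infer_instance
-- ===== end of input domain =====

-- B fuses A's three passes (bit matrix, diagonal matrix, assembly) into one pass that writes
-- each symbol's bits directly into their final codeword slots: objective 'alternative'.

-- ===== PORT A =====
def symbol_to_bits (val : Int) (sf : Int) : List Int :=
  (PySem.List.pyRange 0 sf 1).map (fun i => PySem.Int.band (val >>> i.toNat) 1)

def deinterleave_block (symbol_block : List Int) (sf_rows : Int) (sf : Int) (cr_plus4 : Int) : List (List Int) :=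
  let I : List (List Int) :=
    (PySem.List.enumerate symbol_block).foldl
      (fun I jp =>
        (PySem.List.pyRange 0 sf_rows 1).foldl
          (fun acc i =>
            PySem.List.pySetD acc i
              (PySem.List.pySetD (PySem.List.pyGetD acc i []) jp.1
                (PySem.List.pyGetD (symbol_to_bits jp.2 sf) i 0)))
          I)
      ((PySem.List.pyRange 0 sf_rows 1).map (fun _ => List.replicate cr_plus4.toNat 0))
  let D : List (List Int) :=
    (PySem.List.pyRange 0 cr_plus4 1).foldl
      (fun D j =>
        (PySem.List.pyRange 0 sf_rows 1).foldl
          (fun acc k =>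
            PySem.List.pySetD acc j
              (PySem.List.pySetD (PySem.List.pyGetD acc j []) k
                (PySem.List.pyGetD
                  (PySem.List.pyGetD I (PySem.Int.mod (k - j) sf_rows) []) j 0)))
          D)
      ((PySem.List.pyRange 0 cr_plus4 1).map (fun _ => List.replicate sf_rows.toNat 0))
  (PySem.List.pyRange 0 sf_rows 1).map
    (fun k => (PySem.List.pyRange 0 cr_plus4 1).map
      (fun j => PySem.List.pyGetD (PySem.List.pyGetD D j []) k 0))


-- ===== PORT B =====
def deinterleave_block_alt (symbol_block : List Int) (sf_rows : Int) (sf : Int) (cr_plus4 : Int) : List (List Int) :=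
  (PySem.List.enumerate symbol_block).foldl
    (fun cws jp =>
      (PySem.List.pyRange 0 sf_rows 1).foldl
        (fun acc k =>
          PySem.List.pySetD acc k
            (PySem.List.pySetD (PySem.List.pyGetD acc k []) jp.1
              (PySem.List.pyGetD
                ((PySem.List.pyRange 0 sf 1).map (fun i => PySem.Int.band (jp.2 >>> (i.toNat : Int)) 1))
                (PySem.Int.mod (k - jp.1) sf_rows) 0)))
        cws)
    ((PySem.List.pyRange 0 sf_rows 1).map (fun _ => List.replicate cr_plus4.toNat 0))

-- ===== PRECONDITION & SPEC =====
-- Pre_ excludes exactly the inputs on which Python A raises IndexError: a non-empty block,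
-- with sf_rows > 0, that is longer than cr_plus4 columns or needs more than sf bit rows.
def Pre_deinterleave_block (symbol_block : List Int) (sf_rows : Int) (sf : Int) (cr_plus4 : Int) : Prop :=
  sf_rows ≤ 0 ∨ symbol_block = [] ∨ ((symbol_block.length : Int) ≤ cr_plus4 ∧ sf_rows ≤ sf)
instance (symbol_block : List Int) (sf_rows : Int) (sf : Int) (cr_plus4 : Int) : Decidable (Pre_deinterleave_block symbol_block sf_rows sf cr_plus4) := by unfold Pre_deinterleave_block; infer_instance

def pvWitness_deinterleave_block : List Int × Int × Int × Int := ([5, 2], 2, 3, 3)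

def Spec_deinterleave_block (symbol_block : List Int) (sf_rows : Int) (sf : Int) (cr_plus4 : Int) (out : List (List Int)) : Prop := out = deinterleave_block_alt symbol_block sf_rows sf cr_plus4
instance (symbol_block : List Int) (sf_rows : Int) (sf : Int) (cr_plus4 : Int) (out : List (List Int)) : Decidable (Spec_deinterleave_block symbol_block sf_rows sf cr_plus4 out) := by unfold Spec_deinterleave_block; infer_instance

-- ===== CLAIM (what is proved, stated in full; the proofs are below) =====
def Claim_equal_deinterleave_block : Prop := ∀ (symbol_block : List Int) (sf_rows : Int) (sf : Int) (cr_plus4 : Int), Dom_deinterleave_block symbol_block sf_rows sf cr_plus4 → Pre_deinterleave_block symbol_block sf_rows sf cr_plus4 → Spec_deinterleave_block symbol_block sf_rows sf cr_plus4 (deinterleave_block symbol_block sf_rows sf cr_plus4)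

-- ===== LEMMAS AND PROOFS =====

def pvEnt (m : List (List Int)) (i j : Nat) : Int := (m.getD i []).getD j 0

theorem pvSetD_natCast {α : Type} (xs : List α) (n : Nat) (v : α) :
    PySem.List.pySetD xs (n : Int) v = if n < xs.length then xs.set n v else xs := by
  unfold PySem.List.pySetD PySem.List.pySet? PySem.List.pyIdx?
  split_ifs with h1 <;> simp_all

theorem pvSetD_nonneg {α : Type} (xs : List α) (i : Int) (v : α) (h : 0 ≤ i) :
    PySem.List.pySetD xs i v = if i.toNat < xs.length then xs.set i.toNat v else xs := by
  unfold PySem.List.pySetD PySem.List.pySet? PySem.List.pyIdx?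
  split_ifs <;> simp_all <;> omega

theorem pvGetD_set (row : List Int) (a : Nat) (v : Int) (j : Nat) (ha : a < row.length) :
    (row.set a v).getD j 0 = if j = a then v else row.getD j 0 := by
  by_cases h : j = a
  · subst h; simp [List.getD, ha]
  · simp [h, List.getD, List.getElem?_set_ne (fun hh => h hh.symm)]

theorem pvEnt_set (m : List (List Int)) (n : Nat) (r : List Int) (i j : Nat) (hn : n < m.length) :
    pvEnt (m.set n r) i j = if i = n then r.getD j 0 else pvEnt m i j := by
  unfold pvEnt
  by_cases h : i = n
  · subst h; simp [List.getD, hn]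
  · simp [h, List.getD, List.getElem?_set_ne (fun hh => h hh.symm)]

theorem pvRangeNat (n : Int) :
    PySem.List.pyRange 0 n 1 = (List.range n.toNat).map (Nat.cast : Nat → Int) := by
  rw [PySem.List.pyRange_one 0 n]
  simp only [zero_add, sub_zero]

def pvFoldCol (R jI : Int) (g : Int → Int) (m : List (List Int)) : List (List Int) :=
  (PySem.List.pyRange 0 R 1).foldl
    (fun acc i => PySem.List.pySetD acc i
      (PySem.List.pySetD (PySem.List.pyGetD acc i []) jI (g i))) m

theorem pvColFill (R jI : Int) (g : Int → Int) (m : List (List Int)) (c : Nat)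
    (hrows : ∀ row ∈ m, row.length = c) (hR : R.toNat ≤ m.length)
    (hj0 : 0 ≤ jI) (hjc : jI.toNat < c) :
    (pvFoldCol R jI g m).length = m.length ∧ (∀ row ∈ pvFoldCol R jI g m, row.length = c) ∧
    (∀ i j : Nat, pvEnt (pvFoldCol R jI g m) i j =
      if i < R.toNat ∧ j = jI.toNat then g (i : Int) else pvEnt m i j) := by
  unfold pvFoldCol
  rw [pvRangeNat, List.foldl_map]
  have key : ∀ n : Nat, n ≤ m.length →
      ((List.range n).foldl (fun acc (k : Nat) => PySem.List.pySetD acc ((k : Nat) : Int)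
        (PySem.List.pySetD (PySem.List.pyGetD acc (k : Int) []) jI (g (k : Int)))) m).length = m.length ∧
      (∀ row ∈ (List.range n).foldl (fun acc (k : Nat) => PySem.List.pySetD acc ((k : Nat) : Int)
        (PySem.List.pySetD (PySem.List.pyGetD acc (k : Int) []) jI (g (k : Int)))) m, row.length = c) ∧
      (∀ i j : Nat, pvEnt ((List.range n).foldl (fun acc (k : Nat) => PySem.List.pySetD acc ((k : Nat) : Int)
        (PySem.List.pySetD (PySem.List.pyGetD acc (k : Int) []) jI (g (k : Int)))) m) i j =
        if i < n ∧ j = jI.toNat then g (i : Int) else pvEnt m i j) := by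
    intro n hn
    induction n with
    | zero => refine ⟨rfl, hrows, ?_⟩; intro i j; simp
    | succ n ih =>
      obtain ⟨ih1, ih2, ih3⟩ := ih (by omega)
      set r := (List.range n).foldl (fun acc (k : Nat) => PySem.List.pySetD acc ((k : Nat) : Int)
        (PySem.List.pySetD (PySem.List.pyGetD acc (k : Int) []) jI (g (k : Int)))) m with hr
      rw [List.range_succ, List.foldl_append, List.foldl_cons, List.foldl_nil]
      rw [← hr]
      have hnr : n < r.length := by omega
      have hrowmem : r.getD n [] = r[n] := by simp [List.getD, List.getElem?_eq_getElem hnr]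
      have hrlen : (r.getD n []).length = c := by rw [hrowmem]; exact ih2 _ (List.getElem_mem hnr)
      rw [PySem.List.pyGetD_natCast, pvSetD_nonneg _ _ _ hj0, if_pos (by omega),
          pvSetD_natCast, if_pos hnr]
      refine ⟨by simpa using ih1, ?_, ?_⟩
      · intro row hmem
        rcases List.mem_or_eq_of_mem_set hmem with h | h
        · exact ih2 _ h
        · subst h; simpa using hrlen
      · intro i j
        rw [pvEnt_set _ _ _ _ _ hnr, ih3 i j]
        by_cases hin : i = n
        · subst hin
          rw [if_pos rfl, pvGetD_set _ _ _ _ (by rw [hrlen]; exact hjc)]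
          by_cases hj : j = jI.toNat
          · rw [if_pos hj, if_pos ⟨Nat.lt_succ_self i, hj⟩]
          · have hent : (r.getD i []).getD j 0 = pvEnt r i j := rfl
            rw [if_neg hj, hent, ih3 i j, if_neg (fun h => hj h.2), if_neg (fun h => hj h.2)]
        · rw [if_neg hin]
          by_cases hcond : i < n ∧ j = jI.toNat
          · rw [if_pos hcond, if_pos ⟨by omega, hcond.2⟩]
          · rw [if_neg hcond, if_neg (fun h => hcond ⟨by omega, h.2⟩)]
  exact key R.toNat hR

theorem pvEnt_zeros (L : List Int) (c : Nat) (i j : Nat) :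
    pvEnt (L.map (fun _ => List.replicate c (0 : Int))) i j = 0 := by
  unfold pvEnt
  simp only [List.getD_eq_getElem?_getD, List.getElem?_map]
  rcases hL : L[i]? with _ | x
  · simp
  · simp only [Option.map_some, Option.getD_some, List.getElem?_replicate]
    split <;> simp

def pvFoldRow (R jI : Int) (h : Int → Int) (m : List (List Int)) : List (List Int) :=
  (PySem.List.pyRange 0 R 1).foldl
    (fun acc k => PySem.List.pySetD acc jI
      (PySem.List.pySetD (PySem.List.pyGetD acc jI []) k (h k))) m

theorem pvRowFill (R jI : Int) (h : Int → Int) (m : List (List Int)) (c : Nat)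
    (hrows : ∀ row ∈ m, row.length = c) (hR : R.toNat ≤ c)
    (hj0 : 0 ≤ jI) (hjm : jI.toNat < m.length) :
    (pvFoldRow R jI h m).length = m.length ∧ (∀ row ∈ pvFoldRow R jI h m, row.length = c) ∧
    (∀ i j : Nat, pvEnt (pvFoldRow R jI h m) i j =
      if i = jI.toNat ∧ j < R.toNat then h (j : Int) else pvEnt m i j) := by
  unfold pvFoldRow
  rw [pvRangeNat, List.foldl_map]
  have key : ∀ n : Nat, n ≤ c →
      ((List.range n).foldl (fun acc (k : Nat) => PySem.List.pySetD acc jI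
        (PySem.List.pySetD (PySem.List.pyGetD acc jI []) ((k : Nat) : Int) (h ((k : Nat) : Int)))) m).length = m.length ∧
      (∀ row ∈ (List.range n).foldl (fun acc (k : Nat) => PySem.List.pySetD acc jI
        (PySem.List.pySetD (PySem.List.pyGetD acc jI []) ((k : Nat) : Int) (h ((k : Nat) : Int)))) m, row.length = c) ∧
      (∀ i j : Nat, pvEnt ((List.range n).foldl (fun acc (k : Nat) => PySem.List.pySetD acc jI
        (PySem.List.pySetD (PySem.List.pyGetD acc jI []) ((k : Nat) : Int) (h ((k : Nat) : Int)))) m) i j =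
        if i = jI.toNat ∧ j < n then h (j : Int) else pvEnt m i j) := by
    intro n hn
    induction n with
    | zero => refine ⟨rfl, hrows, ?_⟩; intro i j; simp
    | succ n ih =>
      obtain ⟨ih1, ih2, ih3⟩ := ih (by omega)
      set r := (List.range n).foldl (fun acc (k : Nat) => PySem.List.pySetD acc jI
        (PySem.List.pySetD (PySem.List.pyGetD acc jI []) ((k : Nat) : Int) (h ((k : Nat) : Int)))) m with hr
      rw [List.range_succ, List.foldl_append, List.foldl_cons, List.foldl_nil, ← hr]
      have hjr : jI.toNat < r.length := by omega
      have hrowg : r.getD jI.toNat [] = r[jI.toNat] := by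
        simp [List.getD, List.getElem?_eq_getElem hjr]
      have hrlen : (r.getD jI.toNat []).length = c := by
        rw [hrowg]; exact ih2 _ (List.getElem_mem hjr)
      rw [PySem.List.pyGetD_of_nonneg _ _ hj0, pvSetD_natCast, if_pos (by omega),
          pvSetD_nonneg _ _ _ hj0, if_pos hjr]
      refine ⟨by simpa using ih1, ?_, ?_⟩
      · intro row hmem
        rcases List.mem_or_eq_of_mem_set hmem with hmm | hmm
        · exact ih2 _ hmm
        · subst hmm; simpa using hrlen
      · intro i j
        rw [pvEnt_set _ _ _ _ _ hjr]
        by_cases hin : i = jI.toNat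
        · rw [if_pos hin]
          rw [pvGetD_set _ _ _ _ (by omega)]
          by_cases hj : j = n
          · subst hj; rw [if_pos rfl, if_pos ⟨hin, Nat.lt_succ_self j⟩]
          · have hent : (r.getD jI.toNat []).getD j 0 = pvEnt r jI.toNat j := rfl
            rw [if_neg hj, hent, ih3 jI.toNat j, ← hin]
            by_cases hjn : j < n
            · rw [if_pos ⟨rfl, hjn⟩, if_pos ⟨rfl, by omega⟩]
            · rw [if_neg (fun hh => hjn hh.2), if_neg (fun hh => absurd hh.2 (by omega))]
        · rw [if_neg hin, ih3 i j, if_neg (fun hh => hin hh.1), if_neg (fun hh => hin hh.1)]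
  exact key R.toNat hR

def pvFoldD (C R : Int) (v : Int → Int → Int) (m : List (List Int)) : List (List Int) :=
  (PySem.List.pyRange 0 C 1).foldl (fun D j => pvFoldRow R j (v j) D) m

theorem pvDFill (C R : Int) (v : Int → Int → Int) (m : List (List Int))
    (hlen : m.length = C.toNat) (hrows : ∀ row ∈ m, row.length = R.toNat) :
    (pvFoldD C R v m).length = C.toNat ∧ (∀ row ∈ pvFoldD C R v m, row.length = R.toNat) ∧
    (∀ i j : Nat, pvEnt (pvFoldD C R v m) i j =
      if i < C.toNat ∧ j < R.toNat then v (i : Int) (j : Int) else pvEnt m i j) := by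
  unfold pvFoldD
  rw [pvRangeNat, List.foldl_map]
  have key : ∀ n : Nat, n ≤ C.toNat →
      ((List.range n).foldl (fun D (k : Nat) => pvFoldRow R ((k : Nat) : Int) (v ((k : Nat) : Int)) D) m).length = C.toNat ∧
      (∀ row ∈ (List.range n).foldl (fun D (k : Nat) => pvFoldRow R ((k : Nat) : Int) (v ((k : Nat) : Int)) D) m, row.length = R.toNat) ∧
      (∀ i j : Nat, pvEnt ((List.range n).foldl (fun D (k : Nat) => pvFoldRow R ((k : Nat) : Int) (v ((k : Nat) : Int)) D) m) i j =
        if i < n ∧ j < R.toNat then v (i : Int) (j : Int) else pvEnt m i j) := by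
    intro n hn
    induction n with
    | zero => refine ⟨hlen, hrows, ?_⟩; intro i j; simp
    | succ n ih =>
      obtain ⟨ih1, ih2, ih3⟩ := ih (by omega)
      set r := (List.range n).foldl (fun D (k : Nat) => pvFoldRow R ((k : Nat) : Int) (v ((k : Nat) : Int)) D) m with hr
      rw [List.range_succ, List.foldl_append, List.foldl_cons, List.foldl_nil, ← hr]
      obtain ⟨s1, s2, s3⟩ := pvRowFill R ((n : Nat) : Int) (v ((n : Nat) : Int)) r R.toNat ih2
        (le_refl _) (by positivity) (by simpa [ih1] using (by omega : n < C.toNat))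
      refine ⟨by rw [s1, ih1], s2, ?_⟩
      intro i j
      rw [s3 i j]
      simp only [Int.toNat_natCast]
      by_cases hin : i = n
      · subst hin
        by_cases hj : j < R.toNat
        · rw [if_pos ⟨rfl, hj⟩, if_pos ⟨Nat.lt_succ_self i, hj⟩]
        · rw [if_neg (fun hh => hj hh.2), ih3 i j, if_neg (fun hh => by omega),
              if_neg (fun hh => hj hh.2)]
      · rw [if_neg (fun hh => hin hh.1), ih3 i j]
        by_cases hc : i < n ∧ j < R.toNat
        · rw [if_pos hc, if_pos ⟨by omega, hc.2⟩]
        · rw [if_neg hc, if_neg (fun hh => hc ⟨by omega, hh.2⟩)]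
  exact key C.toNat (le_refl _)

def pvFoldOuter (block : List Int) (s R : Int) (G : Int → Int → Int → Int)
    (m : List (List Int)) : List (List Int) :=
  (PySem.List.enumerate block s).foldl (fun acc jp => pvFoldCol R jp.1 (G jp.1 jp.2) acc) m

theorem pvOuter (block : List Int) (R : Int) (G : Int → Int → Int → Int) :
    ∀ (s : Int) (m : List (List Int)) (c : Nat), 0 ≤ s → m.length = R.toNat →
    (∀ row ∈ m, row.length = c) → s.toNat + block.length ≤ c →
    (pvFoldOuter block s R G m).length = R.toNat ∧
    (∀ row ∈ pvFoldOuter block s R G m, row.length = c) ∧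
    (∀ i j : Nat, pvEnt (pvFoldOuter block s R G m) i j =
      if i < R.toNat ∧ s.toNat ≤ j ∧ j < s.toNat + block.length
      then G (j : Int) (block.getD (j - s.toNat) 0) (i : Int)
      else pvEnt m i j) := by
  induction block with
  | nil =>
    intro s m c hs hlen hrows hC
    unfold pvFoldOuter
    rw [PySem.List.enumerate_nil, List.foldl_nil]
    refine ⟨hlen, hrows, ?_⟩
    intro i j
    rw [if_neg (by simp)]
  | cons sym rest ih =>
    intro s m c hs hlen hrows hC
    simp only [List.length_cons] at hC
    unfold pvFoldOuter
    rw [PySem.List.enumerate_cons, List.foldl_cons]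
    obtain ⟨h1len, h1rows, h1ent⟩ := pvColFill R s (G s sym) m c hrows (by omega) hs (by omega)
    obtain ⟨r1len, r1rows, r1ent⟩ := ih (s+1) (pvFoldCol R s (G s sym) m) c (by omega)
      (by rw [h1len, hlen]) h1rows (by omega)
    refine ⟨r1len, r1rows, ?_⟩
    intro i j
    have hre : pvEnt ((PySem.List.enumerate rest (s+1)).foldl
        (fun acc jp => pvFoldCol R jp.1 (G jp.1 jp.2) acc) (pvFoldCol R s (G s sym) m)) i j =
        pvEnt (pvFoldOuter rest (s+1) R G (pvFoldCol R s (G s sym) m)) i j := rfl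
    rw [hre, r1ent i j]
    by_cases hbig : i < R.toNat ∧ (s+1).toNat ≤ j ∧ j < (s+1).toNat + rest.length
    · rw [if_pos hbig, if_pos (by simp only [List.length_cons]; omega)]
      have hd : j - s.toNat = (j - (s+1).toNat) + 1 := by omega
      rw [hd, List.getD_cons_succ]
    · rw [if_neg hbig, h1ent i j]
      by_cases hedge : i < R.toNat ∧ j = s.toNat
      · rw [if_pos hedge, if_pos (by simp only [List.length_cons]; omega)]
        have h0 : j - s.toNat = 0 := by omega
        have hjs : (j : Int) = s := by omega
        rw [h0, List.getD_cons_zero, hjs]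
      · rw [if_neg hedge, if_neg (by simp only [List.length_cons]; omega)]

theorem pvEqMk (m : List (List Int)) (r c : Nat) (F : Nat → Nat → Int)
    (hlen : m.length = r) (hrows : ∀ row ∈ m, row.length = c)
    (hent : ∀ i j : Nat, i < r → j < c → pvEnt m i j = F i j) :
    m = (List.range r).map (fun i => (List.range c).map (F i)) := by
  apply List.ext_getElem (by simp [hlen])
  intro i h1 h2
  simp only [List.getElem_map, List.getElem_range]
  apply List.ext_getElem (by simp [hrows _ (List.getElem_mem h1)])
  intro j hj1 hj2
  simp only [List.getElem_map, List.getElem_range]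
  have he : pvEnt m i j = F i j := hent i j (by omega) (by simpa using hj2)
  have hg : pvEnt m i j = m[i][j] := by
    unfold pvEnt
    rw [List.getD_eq_getElem?_getD, List.getD_eq_getElem?_getD, List.getElem?_eq_getElem h1]
    simp only [Option.getD_some]
    rw [List.getElem?_eq_getElem hj1]
    simp
  exact hg.symm.trans he

theorem pvEqMkPy (m : List (List Int)) (R C : Int) (F : Int → Int → Int)
    (hlen : m.length = R.toNat) (hrows : ∀ row ∈ m, row.length = C.toNat)
    (hent : ∀ i j : Nat, i < R.toNat → j < C.toNat → pvEnt m i j = F (i : Int) (j : Int)) :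
    m = (PySem.List.pyRange 0 R 1).map
      (fun i => (PySem.List.pyRange 0 C 1).map (fun j => F i j)) := by
  calc m = (List.range R.toNat).map (fun i => (List.range C.toNat).map
        (fun j => F ((i : Nat) : Int) ((j : Nat) : Int))) :=
        pvEqMk m R.toNat C.toNat (fun i j => F ((i : Nat) : Int) ((j : Nat) : Int)) hlen hrows hent
    _ = _ := by
        rw [pvRangeNat R, pvRangeNat C, List.map_map]
        apply List.map_congr_left
        intro k _
        simp only [Function.comp_apply]
        rw [List.map_map]
        rfl

theorem pvNilR (symbol_block : List Int) (sf_rows sf cr_plus4 : Int) (hR : sf_rows ≤ 0) :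
    deinterleave_block symbol_block sf_rows sf cr_plus4
      = deinterleave_block_alt symbol_block sf_rows sf cr_plus4 := by
  unfold deinterleave_block deinterleave_block_alt
  simp only [PySem.List.pyRange_one_eq_nil hR, List.map_nil, List.foldl_nil, List.foldl_fixed]

def pvZeros (R C : Int) : List (List Int) :=
  (PySem.List.pyRange 0 R 1).map (fun _ => List.replicate C.toNat 0)

def pvGA (sf : Int) : Int → Int → Int → Int :=
  fun _ sym i => PySem.List.pyGetD (symbol_to_bits sym sf) i 0

def pvGB (sf R : Int) : Int → Int → Int → Int :=
  fun j sym k => PySem.List.pyGetD (symbol_to_bits sym sf) (PySem.Int.mod (k - j) R) 0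

def pvVA (block : List Int) (sf R C : Int) : Int → Int → Int :=
  fun j k => PySem.List.pyGetD
    (PySem.List.pyGetD (pvFoldOuter block 0 R (pvGA sf) (pvZeros R C))
      (PySem.Int.mod (k - j) R) []) j 0

theorem pvMain (symbol_block : List Int) (sf_rows sf cr_plus4 : Int)
    (hR : 0 < sf_rows) (hC : symbol_block.length ≤ cr_plus4.toNat) :
    deinterleave_block symbol_block sf_rows sf cr_plus4
      = deinterleave_block_alt symbol_block sf_rows sf cr_plus4 := by
  have hA : deinterleave_block symbol_block sf_rows sf cr_plus4 =
      (PySem.List.pyRange 0 sf_rows 1).map (fun k => (PySem.List.pyRange 0 cr_plus4 1).map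
        (fun j => PySem.List.pyGetD (PySem.List.pyGetD
          (pvFoldD cr_plus4 sf_rows (pvVA symbol_block sf sf_rows cr_plus4)
            (pvZeros cr_plus4 sf_rows)) j []) k 0)) := rfl
  have hB : deinterleave_block_alt symbol_block sf_rows sf cr_plus4 =
      pvFoldOuter symbol_block 0 sf_rows (pvGB sf sf_rows) (pvZeros sf_rows cr_plus4) := by
    rfl
  have hZlen : ∀ (P Q : Int), (pvZeros P Q).length = P.toNat := by
    intro P Q; unfold pvZeros; rw [pvRangeNat]; simp
  have hZrows : ∀ (P Q : Int), ∀ row ∈ pvZeros P Q, row.length = Q.toNat := by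
    intro P Q row hrow
    unfold pvZeros at hrow
    obtain ⟨_, _, rfl⟩ := List.mem_map.1 hrow
    simp
  have hZent : ∀ (P Q : Int) (i j : Nat), pvEnt (pvZeros P Q) i j = 0 := by
    intro P Q i j; unfold pvZeros; exact pvEnt_zeros _ _ i j
  obtain ⟨hIlen, hIrows, hIent⟩ := pvOuter symbol_block sf_rows (pvGA sf) 0
    (pvZeros sf_rows cr_plus4) cr_plus4.toNat (le_refl 0) (hZlen _ _) (hZrows _ _)
    (by simpa using hC)
  obtain ⟨hBlen, hBrows, hBent⟩ := pvOuter symbol_block sf_rows (pvGB sf sf_rows) 0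
    (pvZeros sf_rows cr_plus4) cr_plus4.toNat (le_refl 0) (hZlen _ _) (hZrows _ _)
    (by simpa using hC)
  obtain ⟨hDlen, hDrows, hDent⟩ := pvDFill cr_plus4 sf_rows
    (pvVA symbol_block sf sf_rows cr_plus4) (pvZeros cr_plus4 sf_rows) (hZlen _ _) (hZrows _ _)
  rw [hA, hB]
  refine (pvEqMkPy _ sf_rows cr_plus4
    (fun k j => PySem.List.pyGetD (PySem.List.pyGetD
      (pvFoldD cr_plus4 sf_rows (pvVA symbol_block sf sf_rows cr_plus4)
        (pvZeros cr_plus4 sf_rows)) j []) k 0)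
    hBlen hBrows ?_).symm
  intro k j hk hj
  have he0 : 0 ≤ PySem.Int.mod ((k : Int) - (j : Int)) sf_rows := PySem.Int.mod_nonneg _ hR
  have heR : PySem.Int.mod ((k : Int) - (j : Int)) sf_rows < sf_rows := PySem.Int.mod_lt _ hR
  have hetn : (PySem.Int.mod ((k : Int) - (j : Int)) sf_rows).toNat < sf_rows.toNat := by omega
  have hFside : PySem.List.pyGetD (PySem.List.pyGetD
      (pvFoldD cr_plus4 sf_rows (pvVA symbol_block sf sf_rows cr_plus4)
        (pvZeros cr_plus4 sf_rows)) (j : Int) []) (k : Int) 0 =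
      pvEnt (pvFoldOuter symbol_block 0 sf_rows (pvGA sf) (pvZeros sf_rows cr_plus4))
        (PySem.Int.mod ((k : Int) - (j : Int)) sf_rows).toNat j := by
    rw [PySem.List.pyGetD_natCast, PySem.List.pyGetD_natCast]
    have hDe : ((pvFoldD cr_plus4 sf_rows (pvVA symbol_block sf sf_rows cr_plus4)
        (pvZeros cr_plus4 sf_rows)).getD j []).getD k 0 =
        pvEnt (pvFoldD cr_plus4 sf_rows (pvVA symbol_block sf sf_rows cr_plus4)
        (pvZeros cr_plus4 sf_rows)) j k := rfl
    rw [hDe, hDent j k, if_pos ⟨hj, hk⟩]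
    unfold pvVA
    rw [PySem.List.pyGetD_of_nonneg _ _ he0, PySem.List.pyGetD_natCast]
    rfl
  beta_reduce
  rw [hFside, hBent k j, hIent _ j]
  by_cases hjl : j < symbol_block.length
  · rw [if_pos ⟨hk, by omega, by omega⟩, if_pos ⟨hetn, by omega, by omega⟩]
    unfold pvGA pvGB
    rw [Int.toNat_of_nonneg he0]
  · rw [if_neg (by omega), if_neg (by omega), hZent, hZent]

-- ===== VERDICT (by name: the statement is the Claim_ definition above) =====
theorem deinterleave_block_spec : Claim_equal_deinterleave_block := by
  intro block R sf C _ hpre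
  unfold Spec_deinterleave_block
  by_cases hR : R ≤ 0
  · exact pvNilR block R sf C hR
  · replace hR : 0 < R := by omega
    rcases hpre with h | h | ⟨h1, _⟩
    · omega
    · exact pvMain block R sf C hR (by simp [h])
    · exact pvMain block R sf C hR (by omega)
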